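-- pv_equiv track=rewrite | github.com/kmgowda/ds-programs-python | src/string-palindrome-permutation.py | create_bitmap
-- ===== SOURCE A (Python) =====
-- def toggle(bitmap, bit):
--     val = 1 << bit
--     if bitmap&val:
--         bitmap &= ~val
--     else:
--         bitmap|= val
--     return bitmap
--
-- def create_bitmap(str):
--     bitmap = 0
--     for c in str:
--         c = c.lower()
--         val =ord(c)
--         val -= ord('a')
--         bitmap = toggle(bitmap, val)
--     return bitmap
-- ===== SOURCE B (Python) =====
-- def create_bitmap(str):
--     counts = {}
--     for ch in str:
--         k = ch.lower()
--         counts[k] = counts.get(k, 0) + 1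
--     bitmap = 0
--     for k, n in counts.items():
--         bitmap ^= (n % 2) * (1 << (ord(k) - ord('a')))
--     return bitmap
-- ===== Notes on version B (the rewrite author's own statement) =====
-- stated objective: idiomatic
-- what changed: B replaces A's per-character conditional bit toggling with a two-pass counting approach: tally lowercased characters in a dict, then fold each distinct letter's count parity into the bitmap with XOR.
import Mathlib
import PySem

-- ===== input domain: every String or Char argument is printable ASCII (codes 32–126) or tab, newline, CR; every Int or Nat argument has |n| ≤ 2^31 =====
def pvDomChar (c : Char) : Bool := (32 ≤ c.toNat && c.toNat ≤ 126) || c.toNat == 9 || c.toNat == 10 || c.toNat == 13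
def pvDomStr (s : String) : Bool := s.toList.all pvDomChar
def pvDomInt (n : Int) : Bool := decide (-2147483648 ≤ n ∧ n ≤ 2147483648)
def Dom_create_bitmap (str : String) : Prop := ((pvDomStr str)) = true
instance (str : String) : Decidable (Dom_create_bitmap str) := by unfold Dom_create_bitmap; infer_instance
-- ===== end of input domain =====

-- B replaces A's per-character conditional bit toggling with a two-pass approach (tally lowercased
-- characters in a dict, then XOR each distinct letter's count parity into the bitmap); idiomatic, same cost.

-- ===== PORT A =====
def toggle (bitmap : Int) (bit : Int) : Int :=
  let val : Int := 1 <<< bit.toNat          -- Python 1 << bit (raises for bit < 0: such inputs are outside Pre_)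
  if PySem.Int.band bitmap val ≠ 0 then PySem.Int.band bitmap (Int.not val)
  else PySem.Int.bor bitmap val

def create_bitmap (str : String) : Int :=
  str.toList.foldl (fun bitmap c =>
    let c' := PySem.Chars.lowerChar c       -- c = c.lower()
    let val : Int := (c'.toNat : Int)       -- val = ord(c)
    let val2 := val - 97                    -- val -= ord('a')
    toggle bitmap val2) 0

-- ===== PORT B =====
def create_bitmap_alt (str : String) : Int :=
  let counts : PySem.Dict Char Int :=
    str.toList.foldl (fun d ch =>
      let k := PySem.Chars.lowerChar ch
      d.insert k (d.getD k 0 + 1)) PySem.Dict.empty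
  counts.items.foldl (fun bitmap kn =>
    PySem.Int.bxor bitmap
      (PySem.Int.mod kn.2 2 * ((1:Int) <<< ((kn.1.toNat : Int) - 97).toNat))) 0

-- ===== PRECONDITION & SPEC =====
-- Pre_ excludes exactly the inputs on which the Python A raises ValueError: a character whose
-- lowercased code point is below 97 (digits, whitespace, punctuation …) makes Python evaluate 1 << negative.
def Pre_create_bitmap (str : String) : Prop :=
  (str.toList.all (fun c => 97 ≤ (PySem.Chars.lowerChar c).toNat)) = true
instance (str : String) : Decidable (Pre_create_bitmap str) := by unfold Pre_create_bitmap; infer_instance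

def pvWitness_create_bitmap : String := "aBz{"

def Spec_create_bitmap (str : String) (out : Int) : Prop := out = create_bitmap_alt str
instance (str : String) (out : Int) : Decidable (Spec_create_bitmap str out) := by unfold Spec_create_bitmap; infer_instance

-- ===== CLAIM (what is proved, stated in full; the proofs are below) =====
def Claim_equal_create_bitmap : Prop := ∀ (str : String), Dom_create_bitmap str → Pre_create_bitmap str → Spec_create_bitmap str (create_bitmap str)

-- ===== LEMMAS AND PROOFS =====

-- Nat-level single-bit mask of an (already lowercased) key character.
def pvMask (k : Char) : Nat := 1 <<< (((k.toNat : Int) - 97).toNat)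

theorem add_two_pow_eq_xor (k x : Nat) (h : x.testBit k = false) : x + 2^k = x ^^^ 2^k := by
  induction k generalizing x with
  | zero =>
    simp [Nat.testBit_zero] at h
    obtain ⟨m, rfl⟩ : ∃ m, x = 2*m := ⟨x/2, by omega⟩
    have h1 := Nat.xor_bit false m true 0
    simp [Nat.bit] at h1 ⊢
  | succ k ih =>
    have hx : Nat.bit (x.testBit 0) (x/2) = x := by
      simpa [Nat.shiftRight_one] using Nat.bit_testBit_zero_shiftRight_one x
    rw [← hx] at h ⊢
    rw [Nat.testBit_bit_succ] at h
    have h2 : (2:Nat)^(k+1) = Nat.bit false (2^k) := by simp [Nat.bit]; ring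
    rw [h2, Nat.xor_bit, ← ih _ h]
    cases x.testBit 0 <;> simp [Nat.bit] <;> ring

theorem xor_two_pow_of_testBit_true (a k : Nat) (h : a.testBit k = true) : a ^^^ 2^k = a - 2^k := by
  have hm : (a ^^^ 2^k).testBit k = false := by simp [h]
  have h1 := add_two_pow_eq_xor k (a ^^^ 2^k) hm
  have h3 : (a ^^^ 2^k) ^^^ 2^k = a := by simp
  omega

theorem xor_two_pow_of_testBit_false (a k : Nat) (h : a.testBit k = false) : a ^^^ 2^k = a ||| 2^k := by
  apply Nat.eq_of_testBit_eq
  intro j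
  simp [Nat.testBit_two_pow]
  by_cases hj : k = j
  · subst hj; simp [h]
  · simp [hj]

-- Python's  a & ~m  on a nonnegative a clears of a exactly the bits of m.
theorem band_not_natCast (a m : Nat) :
    PySem.Int.band (a : Int) (Int.not (m : Int)) = ((a - (a &&& m) : Nat) : Int) := by
  have h1 : Int.not (m : Int) = -(m:Int) - 1 := by
    cases m with
    | zero => rfl
    | succ n => show Int.negSucc (n+1) = _ ; simp [Int.negSucc_eq]; ring
  rw [h1]
  by_cases hm : m = 0
  · subst hm; simp [PySem.Int.band]
  · have hneg : ¬ (0:Int) ≤ -(m:Int) - 1 := by omega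
    simp only [PySem.Int.band, Int.natCast_nonneg, if_pos, hneg, if_false]
    have h2 : (-(-(m:Int) - 1) - 1) = (m:Int) := by ring
    rw [h2]
    simp

-- A's toggle is XOR with the single-bit mask (on a nonnegative bitmap).
theorem toggle_natCast (a : Nat) (v : Int) :
    toggle (a : Int) v = ((a ^^^ (1 <<< v.toNat) : Nat) : Int) := by
  unfold toggle
  dsimp only
  set k := v.toNat with hk
  rw [PySem.Int.band_natCast]
  by_cases hb : a.testBit k
  · have hand : a &&& 1 <<< k = 1 <<< k := by
      rw [Nat.shiftLeft_eq, Nat.one_mul, Nat.and_two_pow, hb]; simp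
    have hpos : (1 <<< k : Nat) ≠ 0 := by
      simp [Nat.shiftLeft_eq]
    rw [hand, if_pos (by exact_mod_cast hpos), band_not_natCast, hand]
    congr 1
    rw [Nat.shiftLeft_eq, Nat.one_mul]
    rw [xor_two_pow_of_testBit_true a k hb]
  · have hand : a &&& 1 <<< k = 0 := by
      rw [Nat.shiftLeft_eq, Nat.one_mul, Nat.and_two_pow]; simp [hb]
    rw [hand, if_neg (by simp), PySem.Int.bor_natCast]
    congr 1
    rw [Nat.shiftLeft_eq, Nat.one_mul]
    exact (xor_two_pow_of_testBit_false a k (by simp [hb])).symm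

-- A's fold, lifted to Nat (the list holds the already-lowercased characters).
theorem a_fold_natCast (l : List Char) (a : Nat) :
    l.foldl (fun b k => toggle b ((k.toNat : Int) - 97)) (a : Int)
      = ((l.foldl (fun b k => b ^^^ pvMask k) a : Nat) : Int) := by
  induction l generalizing a with
  | nil => rfl
  | cons c l ih =>
    simp only [List.foldl_cons]
    rw [toggle_natCast, ih]
    rfl

-- B's fold over the counter items, lifted to Nat.
theorem b_fold_natCast (S : List Char) (cnt : Char → Nat) (a : Nat) :
    S.foldl (fun b k => PySem.Int.bxor b
        (PySem.Int.mod ((cnt k : Nat) : Int) 2 * ((1:Int) <<< ((k.toNat : Int) - 97).toNat))) (a : Int)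
      = ((S.foldl (fun b k => b ^^^ (cnt k % 2) * pvMask k) a : Nat) : Int) := by
  induction S generalizing a with
  | nil => rfl
  | cons c S ih =>
    simp only [List.foldl_cons]
    have hmod : PySem.Int.mod ((cnt c : Nat) : Int) 2 = ((cnt c % 2 : Nat) : Int) := by
      rw [PySem.Int.mod_eq_emod_of_pos (by omega)]
      push_cast
      rfl
    have hsh : ((1:Int) <<< ((c.toNat : Int) - 97).toNat) = ((pvMask c : Nat) : Int) := by
      rw [pvMask, Int.shiftLeft_eq, Nat.shiftLeft_eq]
      push_cast
      ring
    rw [hmod, hsh, ← Nat.cast_mul, PySem.Int.bxor_natCast, ih]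

theorem foldl_xor_start {α : Type} (f : α → Nat) (l : List α) (a : Nat) :
    l.foldl (fun b k => b ^^^ f k) a = a ^^^ l.foldl (fun b k => b ^^^ f k) 0 := by
  induction l generalizing a with
  | nil => simp
  | cons x l ih => simp only [List.foldl_cons]; rw [ih, ih (0 ^^^ f x)]; simp [Nat.xor_assoc]

-- Changing the fold function at a single member of a duplicate-free list flips the XOR accordingly.
theorem foldl_xor_update (S : List Char) (hnd : S.Nodup) (c : Char) (hc : c ∈ S)
    (g g' : Char → Nat) (h : ∀ k ∈ S, k ≠ c → g' k = g k) :
    S.foldl (fun b k => b ^^^ g' k) 0 = (S.foldl (fun b k => b ^^^ g k) 0) ^^^ g c ^^^ g' c := by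
  induction S with
  | nil => cases hc
  | cons x S ih =>
    simp only [List.foldl_cons]
    rw [foldl_xor_start g' S (0 ^^^ g' x), foldl_xor_start g S (0 ^^^ g x)]
    by_cases hx : x = c
    · subst hx
      have hnotin : x ∉ S := (List.nodup_cons.mp hnd).1
      have hcong : S.foldl (fun b k => b ^^^ g' k) 0 = S.foldl (fun b k => b ^^^ g k) 0 :=
        PySem.List.foldl_congr_mem S _ _ 0 (fun acc k hk => by
          rw [h k (List.mem_cons_of_mem _ hk) (by rintro rfl; exact hnotin hk)])
      rw [hcong]
      simp [Nat.xor_comm]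
    · have hcS : c ∈ S := by
        rcases List.mem_cons.mp hc with h1 | h1
        · exact absurd h1.symm hx
        · exact h1
      rw [ih (List.nodup_cons.mp hnd).2 hcS
          (fun k hk hne => h k (List.mem_cons_of_mem _ hk) hne)]
      rw [h x (List.mem_cons_self ..) hx]
      simp [Nat.xor_comm, Nat.xor_left_comm]

-- The key combinatorial fact: XOR of per-distinct-key parity masks = XOR of per-occurrence masks.
theorem set_parity_fold (ls : List Char) :
    (PySem.Set.ofList ls).foldl (fun b k => b ^^^ (ls.count k % 2) * pvMask k) 0
      = ls.foldl (fun b k => b ^^^ pvMask k) 0 := by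
  induction ls using List.reverseRecOn with
  | nil => rfl
  | append_singleton ls c ih =>
    rw [PySem.Set.ofList_append_singleton, List.foldl_append]
    simp only [List.foldl_cons, List.foldl_nil]
    by_cases hc : c ∈ ls
    · rw [PySem.Set.add_of_mem (by rw [PySem.Set.mem_ofList]; exact hc)]
      have hupd := foldl_xor_update (PySem.Set.ofList ls) (PySem.Set.nodup_ofList ls) c
        (by rw [PySem.Set.mem_ofList]; exact hc)
        (fun k => (ls.count k % 2) * pvMask k)
        (fun k => ((ls ++ [c]).count k % 2) * pvMask k)
        (fun k _ hne => by simp [List.count_append, Ne.symm hne])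
      simp only at hupd
      rw [hupd, ih]
      have hcount : (ls ++ [c]).count c = ls.count c + 1 := by
        simp [List.count_append]
      rw [hcount]
      rcases Nat.mod_two_eq_zero_or_one (ls.count c) with h | h
      · have h1 : (ls.count c + 1) % 2 = 1 := by omega
        simp [h, h1]
      · have h1 : (ls.count c + 1) % 2 = 0 := by omega
        simp [h, h1]
    · rw [PySem.Set.add_of_not_mem (by rw [PySem.Set.mem_ofList]; exact hc), List.foldl_append]
      simp only [List.foldl_cons, List.foldl_nil]
      have hcong : (PySem.Set.ofList ls).foldl
            (fun b k => b ^^^ ((ls ++ [c]).count k % 2) * pvMask k) 0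
          = (PySem.Set.ofList ls).foldl (fun b k => b ^^^ (ls.count k % 2) * pvMask k) 0 :=
        PySem.List.foldl_congr_mem _ _ _ 0 (fun acc k hk => by
          have hkls : k ∈ ls := (PySem.Set.mem_ofList ls k).mp hk
          have hne : k ≠ c := fun he => hc (he ▸ hkls)
          simp [List.count_append, Ne.symm hne])
      rw [hcong, ih]
      have hcc : (ls ++ [c]).count c = 1 := by
        simp [List.count_append, List.count_eq_zero.mpr hc]
      rw [hcc]
      norm_num

theorem ports_agree (str : String) : create_bitmap str = create_bitmap_alt str := by
  unfold create_bitmap create_bitmap_alt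
  dsimp only
  have hA2 : (str.toList.map PySem.Chars.lowerChar).foldl
        (fun (b : Int) k => toggle b ((k.toNat : Int) - 97)) (((0:Nat)) : Int)
      = str.toList.foldl
        (fun bitmap c => toggle bitmap (((PySem.Chars.lowerChar c).toNat : Int) - 97)) (((0:Nat)) : Int) :=
    List.foldl_map
  have hA := hA2.symm.trans (a_fold_natCast (str.toList.map PySem.Chars.lowerChar) 0)
  have hB2 : (str.toList.map PySem.Chars.lowerChar).foldl
        (fun (d : PySem.Dict Char Int) k => d.insert k (d.getD k 0 + 1)) PySem.Dict.empty
      = str.toList.foldl (fun d ch => d.insert (PySem.Chars.lowerChar ch)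
          (d.getD (PySem.Chars.lowerChar ch) 0 + 1)) PySem.Dict.empty :=
    List.foldl_map
  have hB : str.toList.foldl (fun d ch => d.insert (PySem.Chars.lowerChar ch)
          (d.getD (PySem.Chars.lowerChar ch) 0 + 1)) PySem.Dict.empty
      = PySem.Dict.counter (str.toList.map PySem.Chars.lowerChar) :=
    hB2.symm.trans (PySem.Dict.foldl_insert_getD_add_one_eq_counter _)
  rw [hB, PySem.Dict.items_counter]
  have hB3 : ((PySem.Set.ofList (str.toList.map PySem.Chars.lowerChar)).map
        (fun k => (k, ((str.toList.map PySem.Chars.lowerChar).count k : Int)))).foldl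
        (fun (bitmap : Int) kn => PySem.Int.bxor bitmap
          (PySem.Int.mod kn.2 2 * ((1:Int) <<< ((kn.1.toNat : Int) - 97).toNat))) (((0:Nat)):Int)
      = (PySem.Set.ofList (str.toList.map PySem.Chars.lowerChar)).foldl
        (fun (b : Int) k => PySem.Int.bxor b
          (PySem.Int.mod ((((str.toList.map PySem.Chars.lowerChar).count k : Nat)) : Int) 2
            * ((1:Int) <<< ((k.toNat : Int) - 97).toNat))) (((0:Nat)):Int) :=
    List.foldl_map
  have hBfold := hB3.trans (b_fold_natCast _ (fun k => (str.toList.map PySem.Chars.lowerChar).count k) 0)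
  rw [Nat.cast_zero] at hA hBfold
  rw [hA, hBfold, set_parity_fold]

-- ===== VERDICT (by name: the statement is the Claim_ definition above) =====
theorem create_bitmap_spec : Claim_equal_create_bitmap := by
  intro str _ _
  unfold Spec_create_bitmap
  exact ports_agree str
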